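-- pv_equiv track=rewrite | github.com/apple/ml-atoken | atoken_inference/model/utils.py | multiply_all_factors
-- ===== SOURCE A (Python) =====
-- def multiply_all_factors(config):
--     config_values = list(config.values())
--
--     if not config_values:
--         return []
--
--     first_factor = config_values[0]["factor"]
--     result = [1] * len(first_factor)
--
--     for value_dict in config_values:
--         factor_list = value_dict["factor"]
--         for i in range(len(result)):
--             result[i] *= factor_list[i]
--     return result
-- ===== SOURCE B (Python) =====
-- def _col_prod(values, i):
--     p = 1
--     for value_dict in values:
--         p *= value_dict["factor"][i]
--     return p
--
--
-- def multiply_all_factors(config):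
--     values = list(config.values())
--     if not values:
--         return []
--     n = len(values[0]["factor"])
--     return [_col_prod(values, i) for i in range(n)]
-- ===== Notes on version B (the rewrite author's own statement) =====
-- stated objective: idiomatic
-- what changed: A mutates a running result row-by-row over the value dicts; B builds the result column-wise, one list comprehension over indices with a per-column product accumulator.
import Mathlib
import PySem

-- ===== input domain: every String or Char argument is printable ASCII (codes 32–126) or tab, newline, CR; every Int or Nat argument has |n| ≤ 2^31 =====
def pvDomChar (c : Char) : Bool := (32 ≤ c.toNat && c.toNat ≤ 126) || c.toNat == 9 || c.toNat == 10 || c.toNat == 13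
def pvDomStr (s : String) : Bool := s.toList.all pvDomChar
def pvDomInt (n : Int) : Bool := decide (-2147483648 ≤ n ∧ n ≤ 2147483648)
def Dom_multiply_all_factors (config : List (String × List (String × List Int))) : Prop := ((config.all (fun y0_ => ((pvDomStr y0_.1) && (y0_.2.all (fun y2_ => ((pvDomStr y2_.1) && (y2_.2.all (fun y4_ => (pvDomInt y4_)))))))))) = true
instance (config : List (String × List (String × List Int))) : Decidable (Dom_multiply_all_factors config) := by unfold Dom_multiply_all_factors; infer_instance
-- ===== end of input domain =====

-- B builds the result column-wise (a product per index) instead of A's row-wise in-place updates.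

-- ===== PORT A =====
-- value_dict["factor"] (under Pre_ the key is present, so the [] default is never used)
def pvFac (vd : List (String × List Int)) : List Int :=
  (PySem.Dict.ofList vd).getD "factor" []

def multiply_all_factors (config : List (String × List (String × List Int))) : List Int :=
  let config_values := (PySem.Dict.ofList config).values
  match config_values with
  | [] => []
  | v0 :: _ =>
    let first_factor := pvFac v0
    let result := List.replicate first_factor.length (1 : Int)
    -- for value_dict in config_values: for i in range(len(result)): result[i] *= factor_list[i]
    config_values.foldl (fun result vd =>
      result.zipIdx.map (fun p => p.1 * PySem.List.pyGetD (pvFac vd) (p.2 : Int) 0)) result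

-- ===== PORT B =====
def pvColProd (values : List (List (String × List Int))) (i : Int) : Int :=
  values.foldl (fun p vd => p * PySem.List.pyGetD (pvFac vd) i 0) 1

def multiply_all_factors_alt (config : List (String × List (String × List Int))) : List Int :=
  let values := (PySem.Dict.ofList config).values
  match values with
  | [] => []
  | v0 :: _ =>
    let n := (pvFac v0).length
    (PySem.List.pyRange 0 (n : Int) 1).map (pvColProd values)

-- ===== PRECONDITION & SPEC =====
-- Pre_ excludes exactly the inputs where the Python raises: a value dict without the
-- "factor" key (KeyError) or whose factor list is shorter than the first one (IndexError).
def Pre_multiply_all_factors (config : List (String × List (String × List Int))) : Prop :=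
  ∀ vd ∈ (PySem.Dict.ofList config).values,
    ((PySem.Dict.ofList vd).get? "factor").isSome = true ∧
    (pvFac ((PySem.Dict.ofList config).values.headD [])).length ≤ (pvFac vd).length

instance (config : List (String × List (String × List Int))) : Decidable (Pre_multiply_all_factors config) := by unfold Pre_multiply_all_factors; infer_instance

def pvWitness_multiply_all_factors : (List (String × List (String × List Int))) :=
  [("a", [("factor", [2, 3])]), ("b", [("factor", [-1, 4, 7])])]

def Spec_multiply_all_factors (config : List (String × List (String × List Int))) (out : List Int) : Prop := out = multiply_all_factors_alt config
instance (config : List (String × List (String × List Int))) (out : List Int) : Decidable (Spec_multiply_all_factors config out) := by unfold Spec_multiply_all_factors; infer_instance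

-- ===== CLAIM (what is proved, stated in full; the proofs are below) =====
def Claim_equal_multiply_all_factors : Prop := ∀ (config : List (String × List (String × List Int))), Dom_multiply_all_factors config → Pre_multiply_all_factors config → Spec_multiply_all_factors config (multiply_all_factors config)

-- ===== LEMMAS AND PROOFS =====

-- pulling one factor out of the column product
theorem pvFoldMul_shift (i : Int) (vs : List (List (String × List Int))) :
    ∀ a : Int, vs.foldl (fun p vd => p * PySem.List.pyGetD (pvFac vd) i 0) a
      = a * vs.foldl (fun p vd => p * PySem.List.pyGetD (pvFac vd) i 0) 1 := by
  induction vs with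
  | nil => intro a; simp
  | cons w ws ih =>
    intro a
    simp only [List.foldl_cons]
    rw [ih, ih (1 * PySem.List.pyGetD (pvFac w) i 0)]
    ring

theorem pvColProd_cons (vd : List (String × List Int)) (vs : List (List (String × List Int))) (i : Int) :
    pvColProd (vd :: vs) i = PySem.List.pyGetD (pvFac vd) i 0 * pvColProd vs i := by
  simp only [pvColProd, List.foldl_cons]
  rw [pvFoldMul_shift]
  ring

-- A's outer fold, characterised pointwise: each slot accumulates the column product
theorem foldA_eq (vs : List (List (String × List Int))) (r : List Int) :
    vs.foldl (fun result vd =>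
        result.zipIdx.map (fun p => p.1 * PySem.List.pyGetD (pvFac vd) (p.2 : Int) 0)) r
      = r.zipIdx.map (fun p => p.1 * pvColProd vs (p.2 : Int)) := by
  induction vs generalizing r with
  | nil => simp [pvColProd]
  | cons vd vs ih =>
    simp only [List.foldl_cons]
    rw [ih]
    apply List.ext_getElem
    · simp
    · intro k h1 h2
      simp [pvColProd_cons]
      ring

theorem replicate_one_zipIdx (n : ℕ) (h : Int → Int) :
    (List.replicate n (1 : Int)).zipIdx.map (fun p => p.1 * h (p.2 : Int))
      = (List.range n).map (fun k : Nat => h (k : Int)) := by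
  apply List.ext_getElem
  · simp
  · intro k h1 h2
    simp

-- ===== VERDICT (by name: the statement is the Claim_ definition above) =====
theorem multiply_all_factors_spec : Claim_equal_multiply_all_factors := by
  intro config _ _
  unfold Spec_multiply_all_factors multiply_all_factors multiply_all_factors_alt
  cases hv : (PySem.Dict.ofList config).values with
  | nil => rfl
  | cons v0 rest =>
    simp only []
    rw [foldA_eq, replicate_one_zipIdx, PySem.List.pyRange_zero_nat, List.map_map]
    rfl
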